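-- pv_equiv track=rewrite | github.com/houtanb/forecastbench | src/helpers/model_eval.py | capitalize_substrings
-- ===== SOURCE A (Python) =====
-- def capitalize_substrings(model_name):
--     """
--     Capitalize the first letter of each substring in a model name.
--
--     Args:
--         model_name (str): The model name to be capitalized.
--
--     Returns:
--         str: The capitalized model name.
--     """
--     model_name = model_name.replace("gpt", "GPT") if "gpt" in model_name else model_name
--     substrings = model_name.split("-")
--     capitalized_substrings = [
--         substr[0].upper() + substr[1:] if substr and not substr[0].isdigit() else substr
--         for substr in substrings
--     ]
--     return "-".join(capitalized_substrings)
-- ===== SOURCE B (Python) =====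
-- def capitalize_substrings(model_name):
--     if "gpt" in model_name:
--         model_name = model_name.replace("gpt", "GPT")
--     out = []
--     at_start = True
--     for ch in model_name:
--         out.append(ch.upper() if at_start and not ch.isdigit() else ch)
--         at_start = ch == "-"
--     return "".join(out)
-- ===== Notes on version B (the rewrite author's own statement) =====
-- stated objective: alternative
-- what changed: Replaces the split-on-hyphen/per-segment-capitalize/rejoin pipeline with a single left-to-right character scan carrying an at-segment-start flag, so no substring list is ever built.
import Mathlib
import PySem

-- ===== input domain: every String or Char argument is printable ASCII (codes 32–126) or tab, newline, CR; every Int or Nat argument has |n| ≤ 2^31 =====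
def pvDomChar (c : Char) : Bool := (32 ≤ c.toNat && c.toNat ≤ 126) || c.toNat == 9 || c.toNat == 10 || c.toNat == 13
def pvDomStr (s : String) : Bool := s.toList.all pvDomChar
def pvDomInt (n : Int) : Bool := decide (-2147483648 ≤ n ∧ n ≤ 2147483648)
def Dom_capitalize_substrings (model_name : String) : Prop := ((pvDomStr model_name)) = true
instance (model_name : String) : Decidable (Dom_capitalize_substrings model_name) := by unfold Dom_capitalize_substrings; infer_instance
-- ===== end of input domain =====

-- B replaces the split-on-hyphen/map-capitalize/rejoin pipeline by a single character scan with an at-segment-start flag (alternative decomposition, same cost).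

-- ===== PORT A =====
-- the list-comprehension body: substr[0].upper() + substr[1:] if substr and not substr[0].isdigit() else substr
def capA_seg (substr : List Char) : List Char :=
  match PySem.List.pyGet? substr 0 with
  | some c => if !(PySem.Chars.isdigit c) then PySem.Chars.upper [c] ++ PySem.List.slice substr (some 1) none else substr
  | none => substr

def capitalize_substrings (model_name : String) : String :=
  let m := if PySem.Str.isIn "gpt" model_name = true then PySem.Str.replace model_name "gpt" "GPT" else model_name
  let substrings := PySem.Chars.splitOn m.toList ['-']
  let capitalized_substrings := substrings.map capA_seg
  String.ofList (PySem.Chars.join ['-'] capitalized_substrings)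

-- ===== PORT B =====
-- the for-loop over the characters with the at_start flag
def csScan (atStart : Bool) : List Char → List Char
  | [] => []
  | c :: t =>
      (if atStart && !(PySem.Chars.isdigit c) then PySem.Chars.upperChar c else c) :: csScan (c == '-') t

def capitalize_substrings_alt (model_name : String) : String :=
  let m := if PySem.Str.isIn "gpt" model_name = true then PySem.Str.replace model_name "gpt" "GPT" else model_name
  String.ofList (csScan true m.toList)

-- ===== PRECONDITION & SPEC =====
def Spec_capitalize_substrings (model_name : String) (out : String) : Prop := out = capitalize_substrings_alt model_name
instance (model_name : String) (out : String) : Decidable (Spec_capitalize_substrings model_name out) := by unfold Spec_capitalize_substrings; infer_instance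

-- ===== CLAIM (what is proved, stated in full; the proofs are below) =====
def Claim_equal_capitalize_substrings : Prop := ∀ (model_name : String), Dom_capitalize_substrings model_name → Spec_capitalize_substrings model_name (capitalize_substrings model_name)

-- ===== LEMMAS AND PROOFS =====

-- structural-recursive split on '-'
def splitR : List Char → List (List Char)
  | [] => [[]]
  | c :: t =>
      if c = '-' then [] :: splitR t
      else match splitR t with
        | [] => [[c]]
        | s :: r => (c :: s) :: r

theorem splitR_cons (l : List Char) : ∃ s r, splitR l = s :: r := by
  cases l with
  | nil => exact ⟨[], [], rfl⟩
  | cons c t =>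
      unfold splitR
      split_ifs
      · exact ⟨[], splitR t, rfl⟩
      · cases h : splitR t with
        | nil => exact ⟨[c], [], rfl⟩
        | cons s r => exact ⟨c :: s, r, rfl⟩

theorem go_eq (fuel : Nat) (l cur : List Char) (acc : List (List Char)) (h : l.length < fuel) :
    PySem.Chars.splitOn.go ['-'] fuel l cur acc =
      acc.reverse ++ (match splitR l with
        | [] => []
        | s :: r => (cur.reverse ++ s) :: r) := by
  induction fuel generalizing l cur acc with
  | zero => omega
  | succ fuel ih =>
      cases l with
      | nil =>
          rw [PySem.Chars.splitOn.go.eq_def]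
          simp [splitR]
      | cons c rest =>
          rw [PySem.Chars.splitOn.go.eq_def]
          by_cases hc : c = '-'
          · subst hc
            have hp : List.isPrefixOf ['-'] ('-' :: rest) = true := by
              simp [List.isPrefixOf]
            simp only [hp, if_pos, List.length_cons, List.length_nil, List.drop_succ_cons, List.drop_zero]
            rw [ih rest [] (cur.reverse :: acc) (by simpa using Nat.lt_of_succ_lt_succ h)]
            obtain ⟨s, r, hs⟩ := splitR_cons rest
            simp [splitR, hs]
          · have hp : List.isPrefixOf ['-'] (c :: rest) = false := by
              simp [List.isPrefixOf]
              exact fun h => hc h.symm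
            simp only [hp, Bool.false_eq_true, if_neg, not_false_iff]
            rw [ih rest (c :: cur) acc (by simpa using Nat.lt_of_succ_lt_succ h)]
            obtain ⟨s, r, hs⟩ := splitR_cons rest
            simp [splitR, hs, hc]

theorem splitOn_eq (l : List Char) : PySem.Chars.splitOn l ['-'] = splitR l := by
  unfold PySem.Chars.splitOn
  rw [go_eq (l.length + 1) l [] [] (Nat.lt_succ_self _)]
  obtain ⟨s, r, hs⟩ := splitR_cons l
  simp [hs]

theorem capA_seg_nil : capA_seg [] = [] := rfl

theorem capA_seg_cons (c : Char) (s : List Char) :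
    capA_seg (c :: s) = if PySem.Chars.isdigit c then c :: s else PySem.Chars.upperChar c :: s := by
  simp [capA_seg, PySem.List.pyGet?, PySem.List.pyIdx?, PySem.Chars.upper, PySem.List.slice]
  by_cases hd : PySem.Chars.isdigit c <;> simp [hd]

-- the argument list of the final join, depending on whether we are at a segment start
def joinArg (b : Bool) (parts : List (List Char)) : List (List Char) :=
  if b then parts.map capA_seg
  else match parts with
    | [] => []
    | s :: r => s :: r.map capA_seg

theorem scan_join (l : List Char) : ∀ b,
    csScan b l = PySem.Chars.join ['-'] (joinArg b (splitR l)) := by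
  induction l with
  | nil =>
      intro b
      cases b <;>
        simp [csScan, splitR, joinArg, capA_seg_nil, PySem.Chars.join, List.intercalate]
  | cons c t ih =>
      intro b
      by_cases hc : c = '-'
      · subst hc
        have hd : PySem.Chars.isdigit '-' = false := by decide
        have hu : PySem.Chars.upperChar '-' = '-' := by decide
        obtain ⟨s, r, hs⟩ := splitR_cons t
        have hhead : (if b && !(PySem.Chars.isdigit '-') then PySem.Chars.upperChar '-' else '-') = '-' := by
          cases b <;> simp [hd, hu]
        simp only [csScan, hhead]
        rw [show ('-' == '-') = true from rfl, ih true]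
        cases b <;>
          simp [splitR, joinArg, capA_seg_nil, hs, PySem.Chars.join, List.intercalate]
      · obtain ⟨s, r, hs⟩ := splitR_cons t
        have hsp : splitR (c :: t) = (c :: s) :: r := by
          simp [splitR, hc, hs]
        have hb : (c == '-') = false := by simp [hc]
        simp only [csScan, hsp, hb]
        rw [ih false]
        simp only [joinArg, hs]
        cases b with
        | false =>
            simp
            cases r <;> simp [PySem.Chars.join, List.intercalate]
        | true =>
            simp [capA_seg_cons]
            by_cases hdg : PySem.Chars.isdigit c <;>
              · simp [hdg]
                cases r <;> simp [PySem.Chars.join, List.intercalate]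

theorem main_eq (cs : List Char) :
    PySem.Chars.join ['-'] ((PySem.Chars.splitOn cs ['-']).map capA_seg) = csScan true cs := by
  rw [splitOn_eq, scan_join cs true]
  simp [joinArg]

-- ===== VERDICT (by name: the statement is the Claim_ definition above) =====
theorem capitalize_substrings_spec : Claim_equal_capitalize_substrings := by
  intro model_name _
  unfold Spec_capitalize_substrings capitalize_substrings capitalize_substrings_alt
  simp only []
  rw [main_eq]
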